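-- pv_equiv track=rewrite | github.com/planetguy32/DiningRadar | scraper/nutrition_scraper.py | clean_empty_categories
-- ===== SOURCE A (Python) =====
-- def contains_numeric(word):
--     for letter in word:
--         if letter.isnumeric():
--             return True
--     return False
--
-- def clean_empty_categories(string_list):
--     new_list = string_list[:3]
--     x = 3
--     while x+1 < len(string_list):
--         if not (contains_numeric(string_list[x+1]) and
--                 string_list[x+1] != "Vitamin B12"):
--                 x -= 1
--                 break
--         else:
--             new_list.append(string_list[x])
--             new_list.append(string_list[x + 1])
--
--         x += 2
--     return new_list
-- ===== SOURCE B (Python) =====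
-- def contains_numeric(word):
--     return any(c.isnumeric() for c in word)
--
--
-- def clean_empty_categories(string_list):
--     # Recursively compute the cut-off index (end of the run of kept pairs),
--     # then return a single slice instead of appending element by element.
--     def cut(i):
--         if i + 1 < len(string_list) and contains_numeric(string_list[i + 1]) \
--                 and string_list[i + 1] != "Vitamin B12":
--             return cut(i + 2)
--         return i
--     return string_list[:cut(3)]
-- ===== Notes on version B (the rewrite author's own statement) =====
-- stated objective: simpler
-- what changed: B replaces A's while-loop that appends kept elements one by one with a recursive computation of the cut-off index followed by a single slice string_list[:cut(3)].
import Mathlib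
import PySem

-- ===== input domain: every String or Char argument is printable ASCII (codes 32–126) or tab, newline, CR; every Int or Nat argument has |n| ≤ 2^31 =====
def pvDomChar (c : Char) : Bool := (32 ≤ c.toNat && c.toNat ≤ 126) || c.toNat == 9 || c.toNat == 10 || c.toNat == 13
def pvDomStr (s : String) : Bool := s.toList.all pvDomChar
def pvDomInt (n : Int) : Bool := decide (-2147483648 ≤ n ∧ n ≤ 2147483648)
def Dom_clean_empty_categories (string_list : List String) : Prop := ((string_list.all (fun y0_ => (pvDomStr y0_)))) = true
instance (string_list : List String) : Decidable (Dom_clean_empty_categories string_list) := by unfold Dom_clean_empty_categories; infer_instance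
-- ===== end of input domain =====

-- B replaces A's while-loop that appends kept elements one by one with a recursive
-- computation of the cut-off index followed by a single slice (objective: simpler).

-- ===== PORT A =====
-- str.isnumeric is ported via per-char PySem.Chars.isdigit: exact on the ASCII domain Dom_.
def containsNumericA : List Char → Bool
  | [] => false
  | c :: rest => if PySem.Chars.isdigit c then true else containsNumericA rest

def cleanLoopA (s : List String) (x : Nat) (new_list : List String) : List String :=
  if h : x + 1 < s.length then
    if !(containsNumericA (s[x+1]'h).toList && (s[x+1]'h) != "Vitamin B12") then
      -- Python does x -= 1 then break; x is dead afterwards, so only the break matters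
      new_list
    else
      cleanLoopA s (x+2) (new_list ++ [s[x]'(by omega), s[x+1]'h])
  else new_list
termination_by s.length - x

def clean_empty_categories (string_list : List String) : List String :=
  cleanLoopA string_list 3 (PySem.List.slice string_list none (some 3))

-- ===== PORT B =====
def containsNumericB (word : String) : Bool := word.toList.any PySem.Chars.isdigit

def cutB (s : List String) (i : Nat) : Nat :=
  if h : i + 1 < s.length then
    if containsNumericB (s[i+1]'h) && (s[i+1]'h) != "Vitamin B12" then
      cutB s (i+2)
    else i
  else i
termination_by s.length - i

def clean_empty_categories_alt (string_list : List String) : List String :=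
  PySem.List.slice string_list none (some ((cutB string_list 3 : Nat) : Int))

-- ===== PRECONDITION & SPEC =====
def Spec_clean_empty_categories (string_list : List String) (out : List String) : Prop := out = clean_empty_categories_alt string_list
instance (string_list : List String) (out : List String) : Decidable (Spec_clean_empty_categories string_list out) := by unfold Spec_clean_empty_categories; infer_instance

-- ===== CLAIM (what is proved, stated in full; the proofs are below) =====
def Claim_equal_clean_empty_categories : Prop := ∀ (string_list : List String), Dom_clean_empty_categories string_list → Spec_clean_empty_categories string_list (clean_empty_categories string_list)

-- ===== LEMMAS AND PROOFS =====

lemma containsNumeric_eq (l : List Char) : containsNumericA l = l.any PySem.Chars.isdigit := by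
  induction l with
  | nil => rfl
  | cons c rest ih => by_cases h : PySem.Chars.isdigit c <;> simp [containsNumericA, ih, h]

lemma loop_eq (s : List String) : ∀ n x, s.length - x ≤ n →
    cleanLoopA s x (s.take x) = s.take (cutB s x) := by
  intro n
  induction n with
  | zero =>
    intro x hx
    have h : ¬ (x + 1 < s.length) := by omega
    rw [cleanLoopA, cutB]
    simp only [dif_neg h]
  | succ n ih =>
    intro x hx
    rw [cleanLoopA, cutB]
    by_cases h : x + 1 < s.length
    · simp only [dif_pos h]
      have hcA : containsNumericA (s[x+1]'h).toList = containsNumericB (s[x+1]'h) := by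
        rw [containsNumeric_eq]; rfl
      by_cases hc : (containsNumericB (s[x+1]'h) && (s[x+1]'h) != "Vitamin B12") = true
      · rw [if_pos hc, if_neg (by simp [hcA, hc])]
        have htake : s.take x ++ [s[x]'(by omega), s[x+1]'h] = s.take (x + 2) := by
          rw [List.take_add_one, List.take_add_one, List.getElem?_eq_getElem h,
              List.getElem?_eq_getElem (show x < s.length by omega), Option.toList_some,
              Option.toList_some, List.append_assoc]
          rfl
        rw [htake]
        exact ih (x + 2) (by omega)
      · rw [if_neg hc, if_pos (by
          simp only [hcA]
          by_cases hb : containsNumericB (s[x+1]'h) <;> simp_all)]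
    · simp only [dif_neg h]

-- ===== VERDICT (by name: the statement is the Claim_ definition above) =====
theorem clean_empty_categories_spec : Claim_equal_clean_empty_categories := by
  intro s _
  unfold Spec_clean_empty_categories clean_empty_categories clean_empty_categories_alt
  rw [PySem.List.slice_to_natCast]
  have h3 : PySem.List.slice s none (some 3) = s.take 3 := by
    have := PySem.List.slice_to_natCast s 3
    simpa using this
  rw [h3]
  exact loop_eq s (s.length - 3) 3 le_rfl
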